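-- pv_equiv track=rewrite | github.com/MicaelSoares7/OBI-2024-Nivel-Senior | fase 2/danca.py | resolver_danca_de_formatura
-- ===== SOURCE A (Python) =====
-- def resolver_danca_de_formatura(N, M, P, operacoes):
--
--     linha_map = list(range(N))
--     coluna_map = list(range(M))
--
--     for op in operacoes:
--         tipo, a, b = op
--         a -= 1
--         b -= 1
--         if tipo == 'L':
--             linha_map[a], linha_map[b] = linha_map[b], linha_map[a]
--         elif tipo == 'C':
--             coluna_map[a], coluna_map[b] = coluna_map[b], coluna_map[a]
--
--     pista_final = []
--     for i in range(N):
--         linha_atual = []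
--         for j in range(M):
--             aluno_num = linha_map[i] * M + coluna_map[j] + 1
--             linha_atual.append(aluno_num)
--         pista_final.append(linha_atual)
--
--     return pista_final
-- ===== SOURCE B (Python) =====
-- def resolver_danca_de_formatura(N, M, P, operacoes):
--     # Different algorithm: no mutable permutation arrays. Each swap composes a
--     # transposition; the value at final position i is obtained by applying the
--     # transpositions in reverse order to i. Indices not touched by any swap are
--     # fixed points, so the composition is evaluated only on touched indices.
--     def siga(i, trocas):
--         for a, b in trocas:
--             if i == a:
--                 i = b
--             elif i == b:
--                 i = a
--         return i
--
--     trocas_l = [((a - 1) % N, (b - 1) % N)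
--                 for (t, a, b) in operacoes if t == 'L'][::-1]
--     trocas_c = [((a - 1) % M, (b - 1) % M)
--                 for (t, a, b) in operacoes if t == 'C'][::-1]
--
--     mapa_l = {i: siga(i, trocas_l) for ab in trocas_l for i in ab}
--     mapa_c = {j: siga(j, trocas_c) for ab in trocas_c for j in ab}
--
--     linhas = [mapa_l.get(i, i) for i in range(N)]
--     colunas = [mapa_c.get(j, j) + 1 for j in range(M)]
--     return [[r * M + c for c in colunas] for r in linhas]
-- ===== Notes on version B (the rewrite author's own statement) =====
-- stated objective: alternative
-- what changed: B never builds or mutates permutation arrays via swaps: it treats each swap as a transposition, computes the final source index of each touched position by applying the transpositions functionally in reverse order (indices normalised once with %), stores them in a sparse dict with identity as default, and emits the grid from the two resulting index lists.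
import Mathlib
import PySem

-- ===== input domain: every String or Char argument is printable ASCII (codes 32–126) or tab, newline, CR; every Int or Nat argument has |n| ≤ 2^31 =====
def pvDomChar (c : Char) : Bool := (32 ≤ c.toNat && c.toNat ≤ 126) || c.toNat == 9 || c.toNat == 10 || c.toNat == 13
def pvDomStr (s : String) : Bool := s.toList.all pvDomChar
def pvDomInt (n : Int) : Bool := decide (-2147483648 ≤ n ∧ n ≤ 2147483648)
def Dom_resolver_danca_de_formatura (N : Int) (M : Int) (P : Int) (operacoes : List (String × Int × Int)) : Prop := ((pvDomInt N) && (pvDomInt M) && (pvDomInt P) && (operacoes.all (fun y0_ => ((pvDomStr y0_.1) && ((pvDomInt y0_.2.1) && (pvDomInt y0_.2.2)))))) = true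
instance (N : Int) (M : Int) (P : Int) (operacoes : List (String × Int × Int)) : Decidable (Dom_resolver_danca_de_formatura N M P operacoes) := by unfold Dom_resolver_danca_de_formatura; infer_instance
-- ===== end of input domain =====

-- B replaces A's mutable swap arrays by a purely functional algorithm: each swap is a
-- transposition, and each final row/column index is obtained by applying the
-- transpositions in reverse order to the position; same cost class, different algorithm.

-- ===== PORT A =====
-- one iteration of A's swap loop (Python swap: RHS pair read first, then both cells written)
def pvStepA (st : List Int × List Int) (op : String × Int × Int) : List Int × List Int :=
  let a := op.2.1 - 1
  let b := op.2.2 - 1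
  if op.1 = "L" then
    let va := PySem.List.pyGetD st.1 a 0
    let vb := PySem.List.pyGetD st.1 b 0
    (PySem.List.pySetD (PySem.List.pySetD st.1 a vb) b va, st.2)
  else if op.1 = "C" then
    let va := PySem.List.pyGetD st.2 a 0
    let vb := PySem.List.pyGetD st.2 b 0
    (st.1, PySem.List.pySetD (PySem.List.pySetD st.2 a vb) b va)
  else st

def resolver_danca_de_formatura (N : Int) (M : Int) (P : Int) (operacoes : List (String × Int × Int)) : List (List Int) :=
  let st := operacoes.foldl pvStepA (PySem.List.pyRange 0 N 1, PySem.List.pyRange 0 M 1)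
  (PySem.List.pyRange 0 N 1).map (fun i =>
    (PySem.List.pyRange 0 M 1).map (fun j =>
      PySem.List.pyGetD st.1 i 0 * M + PySem.List.pyGetD st.2 j 0 + 1))

-- ===== PORT B =====
-- Source B's siga: apply the transpositions, one after the other, to a position
def pvSigaStep (i : Int) (ab : Int × Int) : Int :=
  if i = ab.1 then ab.2 else if i = ab.2 then ab.1 else i

def pvSiga (i : Int) (trocas : List (Int × Int)) : Int :=
  trocas.foldl pvSigaStep i

-- Source B's dict comprehension {i: siga(i, trocas) for ab in trocas for i in ab}
def pvMapa (trocas : List (Int × Int)) : PySem.Dict Int Int :=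
  trocas.foldl (fun d ab =>
    (d.insert ab.1 (pvSiga ab.1 trocas)).insert ab.2 (pvSiga ab.2 trocas)) PySem.Dict.empty

def resolver_danca_de_formatura_alt (N : Int) (M : Int) (P : Int) (operacoes : List (String × Int × Int)) : List (List Int) :=
  let trocas_l := ((operacoes.filter (fun op => op.1 == "L")).map
      (fun op => (PySem.Int.mod (op.2.1 - 1) N, PySem.Int.mod (op.2.2 - 1) N))).reverse
  let trocas_c := ((operacoes.filter (fun op => op.1 == "C")).map
      (fun op => (PySem.Int.mod (op.2.1 - 1) M, PySem.Int.mod (op.2.2 - 1) M))).reverse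
  let mapa_l := pvMapa trocas_l
  let mapa_c := pvMapa trocas_c
  let linhas := (PySem.List.pyRange 0 N 1).map (fun i => mapa_l.getD i i)
  let colunas := (PySem.List.pyRange 0 M 1).map (fun j => mapa_c.getD j j + 1)
  linhas.map (fun r => colunas.map (fun c => r * M + c))

-- ===== PRECONDITION & SPEC =====
-- Pre_ excludes exactly the inputs where Python A raises IndexError: a swap op whose
-- (1-based, possibly negatively wrapping) indices fall outside the corresponding list.
def Pre_resolver_danca_de_formatura (N : Int) (M : Int) (P : Int) (operacoes : List (String × Int × Int)) : Prop :=
  ∀ op ∈ operacoes,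
    (op.1 = "L" → PySem.Raise.InRange N.toNat (op.2.1 - 1) ∧ PySem.Raise.InRange N.toNat (op.2.2 - 1)) ∧
    (op.1 = "C" → PySem.Raise.InRange M.toNat (op.2.1 - 1) ∧ PySem.Raise.InRange M.toNat (op.2.2 - 1))
instance (N : Int) (M : Int) (P : Int) (operacoes : List (String × Int × Int)) : Decidable (Pre_resolver_danca_de_formatura N M P operacoes) := by unfold Pre_resolver_danca_de_formatura; infer_instance

def pvWitness_resolver_danca_de_formatura : Int × Int × Int × (List (String × Int × Int)) :=
  (2, 3, 2, [("L", 1, 2), ("C", 3, 1)])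

def Spec_resolver_danca_de_formatura (N : Int) (M : Int) (P : Int) (operacoes : List (String × Int × Int)) (out : List (List Int)) : Prop := out = resolver_danca_de_formatura_alt N M P operacoes
instance (N : Int) (M : Int) (P : Int) (operacoes : List (String × Int × Int)) (out : List (List Int)) : Decidable (Spec_resolver_danca_de_formatura N M P operacoes out) := by unfold Spec_resolver_danca_de_formatura; infer_instance

-- ===== CLAIM (what is proved, stated in full; the proofs are below) =====
def Claim_equal_resolver_danca_de_formatura : Prop := ∀ (N : Int) (M : Int) (P : Int) (operacoes : List (String × Int × Int)), Dom_resolver_danca_de_formatura N M P operacoes → Pre_resolver_danca_de_formatura N M P operacoes → Spec_resolver_danca_de_formatura N M P operacoes (resolver_danca_de_formatura N M P operacoes)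

-- ===== LEMMAS AND PROOFS =====

-- A's swap, restricted to one list and one (1-based) index pair
def pvSwapA (l : List Int) (p : Int × Int) : List Int :=
  PySem.List.pySetD (PySem.List.pySetD l (p.1 - 1) (PySem.List.pyGetD l (p.2 - 1) 0))
    (p.2 - 1) (PySem.List.pyGetD l (p.1 - 1) 0)

-- Python's i % N on an in-range (possibly negative) index
theorem pvModNorm (i N : Int) (h1 : -N ≤ i) (h2 : i < N) (hpos : 0 < N) :
    PySem.Int.mod i N = if 0 ≤ i then i else i + N := by
  show i.fmod N = _
  rw [Int.fmod_eq_emod, if_pos (Or.inl (le_of_lt hpos)), add_zero]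
  split_ifs with h
  · exact Int.emod_eq_of_lt h h2
  · have : (i + N) % N = i % N := by
      have := Int.add_mul_emod_self_left (a := i) (b := N) (c := 1)
      simpa using this
    rw [← this]
    exact Int.emod_eq_of_lt (by omega) (by omega)

theorem pvModBounds (i N : Int) (hpos : 0 < N) :
    0 ≤ PySem.Int.mod i N ∧ PySem.Int.mod i N < N := by
  show 0 ≤ i.fmod N ∧ i.fmod N < N
  rw [Int.fmod_eq_emod, if_pos (Or.inl (le_of_lt hpos)), add_zero]
  exact ⟨Int.emod_nonneg i (by omega), Int.emod_lt_of_pos i hpos⟩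

theorem pvIdxNorm (n : Nat) (i N : Int) (hN : (n : Int) = N) (h1 : -N ≤ i) (h2 : i < N) (hpos : 0 < N) :
    PySem.List.pyIdx? n i = some (PySem.Int.mod i N).toNat := by
  rw [pvModNorm i N h1 h2 hpos]
  unfold PySem.List.pyIdx?
  split_ifs with h h' h'' <;> simp_all <;> omega

-- indexing/assignment through an in-range index equals indexing through its % N form
theorem pvGetNorm (xs : List Int) (i N : Int) (d : Int) (hN : (xs.length : Int) = N)
    (h1 : -N ≤ i) (h2 : i < N) (hpos : 0 < N) :
    PySem.List.pyGetD xs i d = PySem.List.pyGetD xs (PySem.Int.mod i N) d := by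
  obtain ⟨hm1, hm2⟩ := pvModBounds i N hpos
  unfold PySem.List.pyGetD PySem.List.pyGet?
  rw [pvIdxNorm xs.length i N hN h1 h2 hpos,
      pvIdxNorm xs.length (PySem.Int.mod i N) N hN (by omega) hm2 hpos]
  congr 1
  rw [pvModNorm (PySem.Int.mod i N) N (by omega) hm2 hpos]
  simp [hm1]

theorem pvSetNorm (xs : List Int) (i N : Int) (v : Int) (hN : (xs.length : Int) = N)
    (h1 : -N ≤ i) (h2 : i < N) (hpos : 0 < N) :
    PySem.List.pySetD xs i v = PySem.List.pySetD xs (PySem.Int.mod i N) v := by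
  obtain ⟨hm1, hm2⟩ := pvModBounds i N hpos
  unfold PySem.List.pySetD PySem.List.pySet?
  rw [pvIdxNorm xs.length i N hN h1 h2 hpos,
      pvIdxNorm xs.length (PySem.Int.mod i N) N hN (by omega) hm2 hpos]
  congr 2
  rw [pvModNorm (PySem.Int.mod i N) N (by omega) hm2 hpos]
  simp [hm1]

-- get after set, all indices nonnegative and in range
theorem pvGetSet (xs : List Int) (k j v d : Int) (hk1 : 0 ≤ k) (hk2 : k < (xs.length : Int))
    (hj1 : 0 ≤ j) (hj2 : j < (xs.length : Int)) :
    PySem.List.pyGetD (PySem.List.pySetD xs k v) j d = if j = k then v else PySem.List.pyGetD xs j d := by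
  rw [PySem.List.pySetD_of_nonneg xs v hk1,
      PySem.List.pyGetD_eq_getElem (xs.set k.toNat v) d hj1 (by simpa using hj2),
      List.getElem_set]
  split_ifs with h h' h'
  · rfl
  · omega
  · omega
  · exact (PySem.List.pyGetD_eq_getElem xs d hj1 hj2).symm

theorem pvLenSwapA (l : List Int) (p : Int × Int) : (pvSwapA l p).length = l.length := by
  simp [pvSwapA, PySem.List.length_pySetD]

-- value of A's swapped list at j = value of the original at the transposed index
theorem pvSwapAGet (l : List Int) (p : Int × Int) (N j : Int) (hN : (l.length : Int) = N)
    (hj1 : 0 ≤ j) (hj2 : j < N)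
    (ha : PySem.Raise.InRange l.length (p.1 - 1)) (hb : PySem.Raise.InRange l.length (p.2 - 1)) :
    PySem.List.pyGetD (pvSwapA l p) j 0
      = PySem.List.pyGetD l (pvSigaStep j (PySem.Int.mod (p.1 - 1) N, PySem.Int.mod (p.2 - 1) N)) 0 := by
  have hpos : 0 < N := by omega
  obtain ⟨ha1, ha2⟩ := ha
  obtain ⟨hb1, hb2⟩ := hb
  rw [hN] at ha1 ha2 hb1 hb2
  set ka := PySem.Int.mod (p.1 - 1) N with hka
  set kb := PySem.Int.mod (p.2 - 1) N with hkb
  obtain ⟨hka1, hka2⟩ := pvModBounds (p.1 - 1) N hpos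
  obtain ⟨hkb1, hkb2⟩ := pvModBounds (p.2 - 1) N hpos
  rw [← hka] at hka1 hka2
  rw [← hkb] at hkb1 hkb2
  have e1 : pvSwapA l p
      = PySem.List.pySetD (PySem.List.pySetD l ka (PySem.List.pyGetD l kb 0)) kb (PySem.List.pyGetD l ka 0) := by
    unfold pvSwapA
    rw [pvGetNorm l (p.1 - 1) N 0 hN ha1 ha2 hpos, pvGetNorm l (p.2 - 1) N 0 hN hb1 hb2 hpos,
        pvSetNorm l (p.1 - 1) N _ hN ha1 ha2 hpos, ← hka, ← hkb,
        pvSetNorm _ (p.2 - 1) N _ (by simp [PySem.List.length_pySetD, hN]) hb1 hb2 hpos]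
  rw [e1]
  have hlen1 : ((PySem.List.pySetD l ka (PySem.List.pyGetD l kb 0)).length : Int) = N := by
    simp [PySem.List.length_pySetD, hN]
  rw [pvGetSet _ kb j _ 0 hkb1 (by omega) hj1 (by omega),
      pvGetSet l ka j _ 0 hka1 (by omega) hj1 (by omega)]
  unfold pvSigaStep
  by_cases h1 : j = kb <;> by_cases h2 : j = ka
  · rw [if_pos h1, if_pos h2, show ka = kb by omega]
  · rw [if_pos h1, if_neg h2, if_pos h1]
  · rw [if_neg h1, if_pos h2, if_pos h2]
  · rw [if_neg h1, if_neg h2, if_neg h2, if_neg h1]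

-- the interleaved fold over (rows, cols) projects to folds over the filtered op lists
theorem pvFoldSplit (ops : List (String × Int × Int)) (l c : List Int) :
    (ops.foldl pvStepA (l, c)).1
        = ((ops.filter (fun op => op.1 == "L")).map Prod.snd).foldl pvSwapA l
    ∧ (ops.foldl pvStepA (l, c)).2
        = ((ops.filter (fun op => op.1 == "C")).map Prod.snd).foldl pvSwapA c := by
  induction ops generalizing l c with
  | nil => exact ⟨rfl, rfl⟩
  | cons op rest ih =>
    by_cases hL : op.1 = "L"
    · have : pvStepA (l, c) op = (pvSwapA l op.2, c) := by
        simp [pvStepA, pvSwapA, hL]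
      simp only [List.foldl_cons, List.filter_cons, this]
      simpa [hL] using ih (pvSwapA l op.2) c
    · by_cases hC : op.1 = "C"
      · have : pvStepA (l, c) op = (l, pvSwapA c op.2) := by
          simp [pvStepA, pvSwapA, hC]
        simp only [List.foldl_cons, List.filter_cons, this]
        simpa [hL, hC] using ih l (pvSwapA c op.2)
      · have : pvStepA (l, c) op = (l, c) := by
          simp [pvStepA, hL, hC]
        simp only [List.foldl_cons, List.filter_cons, this]
        simpa [hL, hC] using ih l c

-- pvSiga stays inside [0, N) when all transposition entries do
theorem pvSigaRange (trocas : List (Int × Int)) (N : Int)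
    (h : ∀ p ∈ trocas, 0 ≤ p.1 ∧ p.1 < N ∧ 0 ≤ p.2 ∧ p.2 < N)
    (i : Int) (hi1 : 0 ≤ i) (hi2 : i < N) :
    0 ≤ pvSiga i trocas ∧ pvSiga i trocas < N := by
  induction trocas generalizing i with
  | nil => exact ⟨hi1, hi2⟩
  | cons p rest ih =>
    obtain ⟨h1, h2, h3, h4⟩ := h p (by simp)
    have hstep : 0 ≤ pvSigaStep i p ∧ pvSigaStep i p < N := by
      unfold pvSigaStep
      split_ifs <;> exact ⟨by omega, by omega⟩
    exact ih (fun q hq => h q (by simp [hq])) _ hstep.1 hstep.2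

-- the fold of A's swaps, read at i, is the original list read at the reverse-composed index
theorem pvFoldGet (N : Int) (ops : List (Int × Int)) (l : List Int) (hN : (l.length : Int) = N)
    (hops : ∀ p ∈ ops, PySem.Raise.InRange l.length (p.1 - 1) ∧ PySem.Raise.InRange l.length (p.2 - 1))
    (i : Int) (hi1 : 0 ≤ i) (hi2 : i < N) :
    PySem.List.pyGetD (ops.foldl pvSwapA l) i 0
      = PySem.List.pyGetD l
          (pvSiga i ((ops.map (fun p => (PySem.Int.mod (p.1 - 1) N, PySem.Int.mod (p.2 - 1) N))).reverse)) 0 := by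
  have hpos : 0 < N := by omega
  induction ops generalizing l with
  | nil => simp [pvSiga]
  | cons p rest ih =>
    obtain ⟨hpa, hpb⟩ := hops p (by simp)
    have hlen' : ((pvSwapA l p).length : Int) = N := by rw [pvLenSwapA]; exact hN
    have hrest : ∀ q ∈ rest, PySem.Raise.InRange (pvSwapA l p).length (q.1 - 1) ∧
        PySem.Raise.InRange (pvSwapA l p).length (q.2 - 1) := by
      intro q hq
      rw [pvLenSwapA]
      exact hops q (by simp [hq])
    have hIH := ih (pvSwapA l p) hlen' hrest
    simp only [List.foldl_cons, List.map_cons, List.reverse_cons] at *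
    rw [hIH]
    set j := pvSiga i ((rest.map (fun q => (PySem.Int.mod (q.1 - 1) N, PySem.Int.mod (q.2 - 1) N))).reverse) with hj
    have hjr : 0 ≤ j ∧ j < N := by
      apply pvSigaRange _ N _ i hi1 hi2
      intro q hq
      simp only [List.mem_reverse, List.mem_map] at hq
      obtain ⟨q', _, rfl⟩ := hq
      obtain ⟨a1, a2⟩ := pvModBounds (q'.1 - 1) N hpos
      obtain ⟨b1, b2⟩ := pvModBounds (q'.2 - 1) N hpos
      exact ⟨a1, a2, b1, b2⟩
    rw [pvSwapAGet l p N j hN hjr.1 hjr.2 hpa hpb]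
    congr 1
    unfold pvSiga
    rw [List.foldl_append]
    rfl

-- reading the identity list at an in-range index gives the index back
theorem pvGetRange (N i : Int) (hi1 : 0 ≤ i) (hi2 : i < N) :
    PySem.List.pyGetD (PySem.List.pyRange 0 N 1) i 0 = i := by
  have hlen : i < ((PySem.List.pyRange 0 N 1).length : Int) := by
    rw [PySem.List.length_pyRange_one]; omega
  rw [PySem.List.pyGetD_eq_getElem (PySem.List.pyRange 0 N 1) 0 hi1 hlen,
      PySem.List.getElem_pyRange_one]
  omega

-- every value stored in the mapa dict is pvSiga of its key
theorem pvMapaSound (T T' : List (Int × Int)) (d : PySem.Dict Int Int)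
    (hd : ∀ k v, d.get? k = some v → v = pvSiga k T) (k : Int) (v : Int)
    (h : (T'.foldl (fun d ab =>
      (d.insert ab.1 (pvSiga ab.1 T)).insert ab.2 (pvSiga ab.2 T)) d).get? k = some v) :
    v = pvSiga k T := by
  induction T' generalizing d with
  | nil => exact hd k v h
  | cons ab rest ih =>
    refine ih _ ?_ h
    intro k' v' h'
    rw [PySem.Dict.get?_insert, PySem.Dict.get?_insert] at h'
    split_ifs at h' with h1 h2
    · cases h'; rw [h1]
    · cases h'; rw [h2]
    · exact hd k' v' h'

-- a key absent from the mapa dict is touched by no transposition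
theorem pvMapaNone (T T' : List (Int × Int)) (d : PySem.Dict Int Int) (k : Int)
    (h : (T'.foldl (fun d ab =>
      (d.insert ab.1 (pvSiga ab.1 T)).insert ab.2 (pvSiga ab.2 T)) d).get? k = none) :
    ∀ ab ∈ T', k ≠ ab.1 ∧ k ≠ ab.2 := by
  induction T' generalizing d with
  | nil => intro ab hab; cases hab
  | cons ab rest ih =>
    intro q hq
    have hrest := ih _ h
    rcases List.mem_cons.1 hq with rfl | hq'
    · by_contra hc
      -- if k were one of this pair's components it would be a key of every later dict
      have hkey : ((d.insert q.1 (pvSiga q.1 T)).insert q.2 (pvSiga q.2 T)).get? k ≠ none := by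
        rw [PySem.Dict.get?_insert, PySem.Dict.get?_insert]
        split_ifs with h1 h2
        · simp
        · simp
        · exact absurd ⟨h2, h1⟩ hc
      -- none at the end forces none at every intermediate dict
      have hmono : ∀ (L : List (Int × Int)) (d' : PySem.Dict Int Int),
          (L.foldl (fun d ab =>
            (d.insert ab.1 (pvSiga ab.1 T)).insert ab.2 (pvSiga ab.2 T)) d').get? k = none →
          d'.get? k = none := by
        intro L
        induction L with
        | nil => intro d' h'; exact h'
        | cons p ps ihL =>
          intro d' h'
          have h2 := ihL _ h'
          rw [PySem.Dict.get?_insert, PySem.Dict.get?_insert] at h2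
          split_ifs at h2
          all_goals first | exact h2 | cases h2
      exact hkey (hmono rest _ h)
    · exact hrest q hq'

-- an index touched by no transposition is a fixed point of pvSiga
theorem pvSigaFixed (T : List (Int × Int)) (k : Int)
    (h : ∀ ab ∈ T, k ≠ ab.1 ∧ k ≠ ab.2) : pvSiga k T = k := by
  induction T with
  | nil => rfl
  | cons ab rest ih =>
    obtain ⟨h1, h2⟩ := h ab (by simp)
    show List.foldl pvSigaStep (pvSigaStep k ab) rest = k
    rw [show pvSigaStep k ab = k by unfold pvSigaStep; rw [if_neg h1, if_neg h2]]
    exact ih (fun q hq => h q (by simp [hq]))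

-- the sparse dict agrees with pvSiga everywhere (identity default off its keys)
@[simp] theorem pvDictSiga (T : List (Int × Int)) (k : Int) :
    (pvMapa T).getD k k = pvSiga k T := by
  cases h : (pvMapa T).get? k with
  | some v =>
    have hv := pvMapaSound T T PySem.Dict.empty
      (fun k' v' h' => by rw [PySem.Dict.get?_empty] at h'; cases h') k v h
    rw [PySem.Dict.getD_eq_get?_getD, h, Option.getD_some, hv]
  | none =>
    rw [PySem.Dict.getD_eq_get?_getD, h, Option.getD_none]
    exact (pvSigaFixed T k (pvMapaNone T T PySem.Dict.empty k h)).symm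

theorem resolver_danca_spec_aux (N M P : Int) (operacoes : List (String × Int × Int))
    (hpre : Pre_resolver_danca_de_formatura N M P operacoes) :
    resolver_danca_de_formatura N M P operacoes = resolver_danca_de_formatura_alt N M P operacoes := by
  unfold resolver_danca_de_formatura resolver_danca_de_formatura_alt
  dsimp only
  simp only [pvDictSiga]
  obtain ⟨hst1, hst2⟩ := pvFoldSplit operacoes (PySem.List.pyRange 0 N 1) (PySem.List.pyRange 0 M 1)
  rw [hst1, hst2, List.map_map]
  apply List.map_congr_left
  intro i hi
  obtain ⟨hi1, hi2⟩ := (PySem.List.mem_pyRange_one).1 hi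
  have hNpos : 0 < N := by omega
  have hNlen : ((PySem.List.pyRange 0 N 1).length : Int) = N := by
    rw [PySem.List.length_pyRange_one]; omega
  -- row index
  have hrow : PySem.List.pyGetD
      (((operacoes.filter (fun op => op.1 == "L")).map Prod.snd).foldl pvSwapA (PySem.List.pyRange 0 N 1)) i 0
      = pvSiga i (((operacoes.filter (fun op => op.1 == "L")).map
          (fun op => (PySem.Int.mod (op.2.1 - 1) N, PySem.Int.mod (op.2.2 - 1) N))).reverse) := by
    rw [pvFoldGet N _ _ hNlen ?hops i hi1 hi2]
    · rw [List.map_map]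
      have hmaps : ((operacoes.filter (fun op => op.1 == "L")).map
            ((fun p => (PySem.Int.mod (p.1 - 1) N, PySem.Int.mod (p.2 - 1) N)) ∘ Prod.snd))
          = (operacoes.filter (fun op => op.1 == "L")).map
            (fun op => (PySem.Int.mod (op.2.1 - 1) N, PySem.Int.mod (op.2.2 - 1) N)) := rfl
      rw [hmaps]
      set tl := ((operacoes.filter (fun op => op.1 == "L")).map
            (fun op => (PySem.Int.mod (op.2.1 - 1) N, PySem.Int.mod (op.2.2 - 1) N))).reverse with htl
      have hrange : 0 ≤ pvSiga i tl ∧ pvSiga i tl < N := by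
        apply pvSigaRange _ N _ i hi1 hi2
        intro q hq
        rw [htl] at hq
        simp only [List.mem_reverse, List.mem_map] at hq
        obtain ⟨q', _, rfl⟩ := hq
        obtain ⟨a1, a2⟩ := pvModBounds (q'.2.1 - 1) N hNpos
        obtain ⟨b1, b2⟩ := pvModBounds (q'.2.2 - 1) N hNpos
        exact ⟨a1, a2, b1, b2⟩
      exact pvGetRange N _ hrange.1 hrange.2
    case hops =>
      intro p hp
      simp only [List.mem_map, List.mem_filter] at hp
      obtain ⟨op, ⟨hmem, heq⟩, rfl⟩ := hp
      have hL : op.1 = "L" := by simpa using heq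
      obtain ⟨hIn, _⟩ := hpre op hmem
      obtain ⟨h1, h2⟩ := hIn hL
      constructor <;> (rw [PySem.List.length_pyRange_one]; simpa using ‹_›)
  simp only [Function.comp_apply]
  rw [hrow, List.map_map]
  apply List.map_congr_left
  intro j hj
  obtain ⟨hj1, hj2⟩ := (PySem.List.mem_pyRange_one).1 hj
  have hMpos : 0 < M := by omega
  have hMlen : ((PySem.List.pyRange 0 M 1).length : Int) = M := by
    rw [PySem.List.length_pyRange_one]; omega
  have hcol : PySem.List.pyGetD
      (((operacoes.filter (fun op => op.1 == "C")).map Prod.snd).foldl pvSwapA (PySem.List.pyRange 0 M 1)) j 0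
      = pvSiga j (((operacoes.filter (fun op => op.1 == "C")).map
          (fun op => (PySem.Int.mod (op.2.1 - 1) M, PySem.Int.mod (op.2.2 - 1) M))).reverse) := by
    rw [pvFoldGet M _ _ hMlen ?hops j hj1 hj2]
    · rw [List.map_map]
      have hmaps : ((operacoes.filter (fun op => op.1 == "C")).map
            ((fun p => (PySem.Int.mod (p.1 - 1) M, PySem.Int.mod (p.2 - 1) M)) ∘ Prod.snd))
          = (operacoes.filter (fun op => op.1 == "C")).map
            (fun op => (PySem.Int.mod (op.2.1 - 1) M, PySem.Int.mod (op.2.2 - 1) M)) := rfl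
      rw [hmaps]
      set tc := ((operacoes.filter (fun op => op.1 == "C")).map
            (fun op => (PySem.Int.mod (op.2.1 - 1) M, PySem.Int.mod (op.2.2 - 1) M))).reverse with htc
      have hrange : 0 ≤ pvSiga j tc ∧ pvSiga j tc < M := by
        apply pvSigaRange _ M _ j hj1 hj2
        intro q hq
        rw [htc] at hq
        simp only [List.mem_reverse, List.mem_map] at hq
        obtain ⟨q', _, rfl⟩ := hq
        obtain ⟨a1, a2⟩ := pvModBounds (q'.2.1 - 1) M hMpos
        obtain ⟨b1, b2⟩ := pvModBounds (q'.2.2 - 1) M hMpos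
        exact ⟨a1, a2, b1, b2⟩
      exact pvGetRange M _ hrange.1 hrange.2
    case hops =>
      intro p hp
      simp only [List.mem_map, List.mem_filter] at hp
      obtain ⟨op, ⟨hmem, heq⟩, rfl⟩ := hp
      have hC : op.1 = "C" := by simpa using heq
      obtain ⟨_, hIn⟩ := hpre op hmem
      obtain ⟨h1, h2⟩ := hIn hC
      constructor <;> (rw [PySem.List.length_pyRange_one]; simpa using ‹_›)
  simp only [Function.comp_apply]
  rw [hcol]
  ring

-- ===== VERDICT (by name: the statement is the Claim_ definition above) =====
theorem resolver_danca_de_formatura_spec : Claim_equal_resolver_danca_de_formatura := by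
  intro N M P operacoes _ hpre
  unfold Spec_resolver_danca_de_formatura
  exact resolver_danca_spec_aux N M P operacoes hpre
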